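-- pv_equiv track=rewrite | github.com/chancesend/pavo | pavo_py/feathers.py | calc_feather_led_span_num
-- ===== SOURCE A (Python) =====
-- feather_led_span_map = {
--     'small': [
--         ('c', 45),
--         ('k', 22),
--         ('l', 21),
--         ('i', 9),
--         ('g', 10),
--         ('d', 46),
--         ('a', 4),
--     ],
--     'medium': [
--         ('a', 6),
--         ('c', 54),
--         ('k', 37),
--         ('l', 32),
--         ('i', 13),
--         ('g', 14),
--         ('d', 53),
--     ],
--     'large': [
--         ('a', 4),
--         ('c', 71),
--         ('k', 37),
--         ('l', 30),
--         ('i', 15),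
--         ('g', 15),
--         ('d', 70),
--         ('a', 5),
--     ],
--     'top': [
--         ('a', 9),
--         ('c', 81),
--         ('k', 52),
--         ('l', 52),
--         ('i', 22),
--         ('g', 20),
--         ('d', 77),
--     ],
-- }
--
-- def calc_feather_led_span_num(feather, led):
--     span_map = feather_led_span_map[feather]
--     start_led = 0
--     for (i, (key, num_leds)) in enumerate(span_map):
--         stop_led = start_led + num_leds - 1
--         if start_led <= led <= stop_led:
--             break
--         start_led += num_leds
--     else:
--         raise IndexError("Invalid LED number")
--
--     return (i, key)
-- ===== SOURCE B (Python) =====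
-- feather_led_span_map = {
--     'small': [
--         ('c', 45),
--         ('k', 22),
--         ('l', 21),
--         ('i', 9),
--         ('g', 10),
--         ('d', 46),
--         ('a', 4),
--     ],
--     'medium': [
--         ('a', 6),
--         ('c', 54),
--         ('k', 37),
--         ('l', 32),
--         ('i', 13),
--         ('g', 14),
--         ('d', 53),
--     ],
--     'large': [
--         ('a', 4),
--         ('c', 71),
--         ('k', 37),
--         ('l', 30),
--         ('i', 15),
--         ('g', 15),
--         ('d', 70),
--         ('a', 5),
--     ],
--     'top': [
--         ('a', 9),
--         ('c', 81),
--         ('k', 52),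
--         ('l', 52),
--         ('i', 22),
--         ('g', 20),
--         ('d', 77),
--     ],
-- }
--
--
-- def calc_feather_led_span_num(feather, led):
--     span_map = feather_led_span_map[feather]
--     # cumulative exclusive end boundary of each span
--     prefix = []
--     total = 0
--     for _, n in span_map:
--         total += n
--         prefix.append(total)
--     if led < 0 or led >= total:
--         raise IndexError("Invalid LED number")
--     # the span index is the number of boundaries at or below led
--     i = sum(1 for p in prefix if p <= led)
--     return (i, span_map[i][0])
-- ===== Notes on version B (the rewrite author's own statement) =====
-- stated objective: alternative
-- what changed: Replaces the break/else scan carrying a running start offset with a boundary table: build the cumulative end boundaries once, range-check against the total, and compute the span index as the count of boundaries <= led.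
import Mathlib
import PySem

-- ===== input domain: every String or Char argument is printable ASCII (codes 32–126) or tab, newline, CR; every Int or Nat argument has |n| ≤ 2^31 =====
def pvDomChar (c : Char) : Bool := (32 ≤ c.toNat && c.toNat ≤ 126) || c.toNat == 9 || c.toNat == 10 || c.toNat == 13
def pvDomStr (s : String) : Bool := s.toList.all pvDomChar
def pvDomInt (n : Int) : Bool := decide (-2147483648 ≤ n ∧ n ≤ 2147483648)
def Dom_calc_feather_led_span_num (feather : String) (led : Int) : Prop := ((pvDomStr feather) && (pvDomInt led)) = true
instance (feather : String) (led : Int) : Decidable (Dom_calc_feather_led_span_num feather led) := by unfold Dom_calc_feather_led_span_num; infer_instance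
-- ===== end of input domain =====

-- B replaces A's break/else scan (running start offset) by a cumulative-boundary table and a
-- count of boundaries ≤ led; same cost, different structure ("alternative").


-- ===== PORT A =====
-- module-level constant feather_led_span_map (shared by both Pythons)
def featherLedSpanMap : PySem.Dict String (List (String × Int)) :=
  PySem.Dict.ofList [
    ("small",  [("c", 45), ("k", 22), ("l", 21), ("i", 9),  ("g", 10), ("d", 46), ("a", 4)]),
    ("medium", [("a", 6),  ("c", 54), ("k", 37), ("l", 32), ("i", 13), ("g", 14), ("d", 53)]),
    ("large",  [("a", 4),  ("c", 71), ("k", 37), ("l", 30), ("i", 15), ("g", 15), ("d", 70), ("a", 5)]),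
    ("top",    [("a", 9),  ("c", 81), ("k", 52), ("l", 52), ("i", 22), ("g", 20), ("d", 77)])]

-- A's for/else loop: returns none where the Python raises IndexError
def aLoop : List (String × Int) → Int → Int → Int → Option (Int × String)
  | [], _, _, _ => none
  | (key, numLeds) :: rest, i, startLed, led =>
      let stopLed := startLed + numLeds - 1
      if startLed ≤ led ∧ led ≤ stopLed then some (i, key)
      else aLoop rest (i + 1) (startLed + numLeds) led

def calc_feather_led_span_num (feather : String) (led : Int) : Int × String :=
  match PySem.Dict.get? featherLedSpanMap feather with
  | none => (0, "")          -- KeyError; excluded by Pre_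
  | some spanMap => (aLoop spanMap 0 0 led).getD (0, "")   -- none = IndexError; excluded by Pre_

-- ===== PORT B =====
-- Source B's boundary-building loop: threads total and returns (prefix, final total)
def bScan : List (String × Int) → Int → (List Int × Int)
  | [], total => ([], total)
  | (_, n) :: rest, total =>
      let t := total + n
      let (ps, tf) := bScan rest t
      (t :: ps, tf)

def calc_feather_led_span_num_alt (feather : String) (led : Int) : Int × String :=
  match PySem.Dict.get? featherLedSpanMap feather with
  | none => (0, "")          -- KeyError; excluded by Pre_
  | some spanMap =>
      let (pfx, total) := bScan spanMap 0
      if led < 0 ∨ total ≤ led then (0, "")   -- IndexError; excluded by Pre_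
      else
        let i : Int := ((pfx.filter (fun p => p ≤ led)).length : Int)
        match PySem.List.pyGet? spanMap i with
        | some (k, _) => (i, k)
        | none => (0, "")

-- ===== PRECONDITION & SPEC =====
-- Pre_: exactly the inputs where A returns (valid feather and led inside the total LED range);
-- elsewhere A raises KeyError or IndexError.
def Pre_calc_feather_led_span_num (feather : String) (led : Int) : Prop :=
  (feather = "small" ∧ 0 ≤ led ∧ led < 157) ∨
  (feather = "medium" ∧ 0 ≤ led ∧ led < 209) ∨
  (feather = "large" ∧ 0 ≤ led ∧ led < 247) ∨
  (feather = "top" ∧ 0 ≤ led ∧ led < 313)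
instance (feather : String) (led : Int) : Decidable (Pre_calc_feather_led_span_num feather led) := by
  unfold Pre_calc_feather_led_span_num; infer_instance

def pvWitness_calc_feather_led_span_num : String × Int := ("small", 46)

def Spec_calc_feather_led_span_num (feather : String) (led : Int) (out : Int × String) : Prop := out = calc_feather_led_span_num_alt feather led
instance (feather : String) (led : Int) (out : Int × String) : Decidable (Spec_calc_feather_led_span_num feather led out) := by unfold Spec_calc_feather_led_span_num; infer_instance

-- ===== CLAIM (what is proved, stated in full; the proofs are below) =====
def Claim_equal_calc_feather_led_span_num : Prop := ∀ (feather : String) (led : Int), Dom_calc_feather_led_span_num feather led → Pre_calc_feather_led_span_num feather led → Spec_calc_feather_led_span_num feather led (calc_feather_led_span_num feather led)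

-- ===== LEMMAS AND PROOFS =====

-- every boundary produced from start is ≥ start + its span (≥ start when spans are nonneg)
theorem bScan_mem_ge (l : List (String × Int)) (s : Int) (hpos : ∀ p ∈ l, 0 ≤ p.2) :
    ∀ x ∈ (bScan l s).1, s ≤ x := by
  induction l generalizing s with
  | nil => simp [bScan]
  | cons hd tl ih =>
      obtain ⟨k, n⟩ := hd
      have hn : 0 ≤ n := hpos (k, n) (by simp)
      have htl : ∀ p ∈ tl, 0 ≤ p.2 := fun p hp => hpos p (List.mem_cons_of_mem _ hp)
      simp only [bScan]
      intro x hx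
      rw [List.mem_cons] at hx
      rcases hx with h | h
      · omega
      · have := ih (s + n) htl x h
        omega

-- main invariant: A's scan lands on the span whose index is the count of boundaries ≤ led
theorem aLoop_eq_count (l : List (String × Int)) (i start led : Int)
    (hpos : ∀ p ∈ l, 0 ≤ p.2) (hlo : start ≤ led) (hhi : led < (bScan l start).2) :
    ∃ k n, (l[((bScan l start).1.filter (fun p => p ≤ led)).length]?) = some (k, n) ∧
      aLoop l i start led =
        some (i + (((bScan l start).1.filter (fun p => p ≤ led)).length : Int), k) := by
  induction l generalizing i start with
  | nil => simp [bScan] at hhi; omega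
  | cons hd tl ih =>
      obtain ⟨key, n⟩ := hd
      have hn : 0 ≤ n := hpos (key, n) (by simp)
      have htl : ∀ p ∈ tl, 0 ≤ p.2 := fun p hp => hpos p (List.mem_cons_of_mem _ hp)
      by_cases hin : led < start + n
      · -- first span matches; no boundary is ≤ led
        have hfilt : ((bScan ((key, n) :: tl) start).1.filter (fun p => p ≤ led)) = [] := by
          simp only [bScan, List.filter_eq_nil_iff, List.mem_cons]
          rintro x (h | h)
          · simp; omega
          · have := bScan_mem_ge tl (start + n) htl x h
            simp; omega
        refine ⟨key, n, ?_, ?_⟩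
        · rw [hfilt]; rfl
        · rw [hfilt]
          simp only [aLoop, List.length_nil, Int.natCast_zero, add_zero]
          rw [if_pos ⟨hlo, by omega⟩]
      · -- first span skipped; its boundary start+n ≤ led is counted
        have hstep : start + n ≤ led := by omega
        have hhi' : led < (bScan tl (start + n)).2 := by
          have : (bScan ((key, n) :: tl) start).2 = (bScan tl (start + n)).2 := by
            simp only [bScan]
          omega
        obtain ⟨k', n', hget, hloop⟩ := ih (i + 1) (start + n) htl hstep hhi'
        have hfilt : ((bScan ((key, n) :: tl) start).1.filter (fun p => p ≤ led)) =
            (start + n) :: ((bScan tl (start + n)).1.filter (fun p => p ≤ led)) := by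
          simp only [bScan, List.filter_cons]
          rw [if_pos (by simpa using hstep)]
        refine ⟨k', n', ?_, ?_⟩
        · rw [hfilt]; simpa using hget
        · rw [hfilt]
          simp only [aLoop]
          rw [if_neg (by omega)]
          rw [hloop]
          congr 1
          simp only [List.length_cons]
          push_cast
          ring_nf

-- agreement for one fixed (valid) feather, reusing the invariant
theorem ports_agree_on (m : List (String × Int)) (led : Int)
    (hpos : ∀ p ∈ m, 0 ≤ p.2) (hlo : 0 ≤ led) (hhi : led < (bScan m 0).2) :
    (aLoop m 0 0 led).getD (0, "") =
      (let (pfx, total) := bScan m 0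
       if led < 0 ∨ total ≤ led then ((0 : Int), "")
       else
         let i : Int := ((pfx.filter (fun p => p ≤ led)).length : Int)
         match PySem.List.pyGet? m i with
         | some (k, _) => (i, k)
         | none => ((0 : Int), "")) := by
  obtain ⟨k, n, hget, hloop⟩ := aLoop_eq_count m 0 0 led hpos hlo hhi
  set c := ((bScan m 0).1.filter (fun p => p ≤ led)).length with hc
  have hpy : PySem.List.pyGet? m (c : Int) = m[c]? := PySem.List.pyGet?_natCast m c
  rcases hscan : bScan m 0 with ⟨pfx, total⟩
  simp only [hscan] at hget hloop hhi hc
  dsimp only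
  rw [if_neg (by omega)]
  simp only [hloop, Option.getD_some, zero_add, ← hc]
  rw [hpy, hget]

theorem calc_feather_led_span_num_spec_aux :
    ∀ (feather : String) (led : Int), Pre_calc_feather_led_span_num feather led →
      calc_feather_led_span_num feather led = calc_feather_led_span_num_alt feather led := by
  intro feather led hpre
  rcases hpre with ⟨hf, h0, h1⟩ | ⟨hf, h0, h1⟩ | ⟨hf, h0, h1⟩ | ⟨hf, h0, h1⟩ <;> subst hf <;>
  · unfold calc_feather_led_span_num calc_feather_led_span_num_alt
    rw [show PySem.Dict.get? featherLedSpanMap _ = some _ from rfl]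
    exact ports_agree_on _ led (by decide) h0 (by exact lt_of_lt_of_le h1 (by decide))

-- ===== VERDICT (by name: the statement is the Claim_ definition above) =====
theorem calc_feather_led_span_num_spec : Claim_equal_calc_feather_led_span_num := by
  intro feather led _ hpre
  exact calc_feather_led_span_num_spec_aux feather led hpre
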